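-- pv_equiv track=rewrite | github.com/mahom710/Rosalind | SecondLevel_Problems/RNA Splicing.py | RemoveIntrons
-- ===== SOURCE A (Python) =====
-- def RemoveIntrons(mRNA,introns_list):
--     # for each intron
--     for intron in introns_list:
--         index = 0
--         # find and remove every intron
--         while index != -1:
--             index = mRNA.find(intron)
--             if index != -1:
--                 mRNA = mRNA[0:index] + mRNA[index+len(intron):]
--     return mRNA
-- ===== SOURCE B (Python) =====
-- def RemoveIntrons(mRNA, introns_list):
--     # One left-to-right stack pass per intron instead of repeated find-and-reslice.
--     for intron in introns_list:
--         k = len(intron)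
--         if not k or intron not in mRNA:
--             continue
--         target = list(intron)
--         stack = []
--         for ch in mRNA:
--             stack.append(ch)
--             if stack[-k:] == target:
--                 del stack[-k:]
--         mRNA = ''.join(stack)
--     return mRNA
-- ===== Notes on version B (the rewrite author's own statement) =====
-- stated objective: alternative
-- what changed: Replaces A's repeated find-leftmost-occurrence-and-reslice loop (rescanning the string from the start after every removal) with a single left-to-right stack pass per occurring intron: push each character and pop the last len(intron) characters whenever they equal the intron, which also catches matches created at removal boundaries; introns that do not occur are skipped by one substring test.
import Mathlib
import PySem

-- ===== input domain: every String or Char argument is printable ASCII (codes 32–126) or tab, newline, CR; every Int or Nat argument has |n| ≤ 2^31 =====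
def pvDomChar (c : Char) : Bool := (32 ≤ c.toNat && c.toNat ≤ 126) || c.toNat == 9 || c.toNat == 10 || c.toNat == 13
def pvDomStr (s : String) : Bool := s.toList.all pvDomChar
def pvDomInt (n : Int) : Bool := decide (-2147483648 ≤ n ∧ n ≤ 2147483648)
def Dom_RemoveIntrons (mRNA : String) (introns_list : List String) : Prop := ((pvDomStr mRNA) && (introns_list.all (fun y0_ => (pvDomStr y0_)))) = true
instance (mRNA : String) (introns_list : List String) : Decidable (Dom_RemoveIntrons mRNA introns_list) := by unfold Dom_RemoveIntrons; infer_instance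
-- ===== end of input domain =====

-- B replaces A's repeated find-leftmost-and-reslice loop by one left-to-right stack pass
-- per intron (append each char, pop the last len(intron) chars whenever they equal the
-- intron), skipping introns that do not occur at all; objective: alternative algorithm.

-- ===== PORT A =====
-- inner `while index != -1` loop of A; fuel (string length + 1) only makes the
-- recursion structural — it is never exhausted when the intron is nonempty
def pvAStrip (w : List Char) : Nat → List Char → List Char
  | 0, m => m
  | f + 1, m =>
    let index := PySem.Chars.find m w
    if index ≠ -1 then
      pvAStrip w f (PySem.List.slice m (some 0) (some index) ++
                    PySem.List.slice m (some (index + (w.length : Int))) none)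
    else m

def RemoveIntrons (mRNA : String) (introns_list : List String) : String :=
  String.ofList
    (introns_list.foldl (fun m intron => pvAStrip intron.toList (m.length + 1) m) mRNA.toList)

-- ===== PORT B =====
-- one step of B's stack scan: push c; if the last k chars equal the intron, delete them
def pvBStep (w : List Char) (stack : List Char) (c : Char) : List Char :=
  let st := stack ++ [c]
  if PySem.List.slice st (some (-(w.length : Int))) none = w then
    PySem.List.slice st none (some (-(w.length : Int)))
  else st

def RemoveIntrons_alt (mRNA : String) (introns_list : List String) : String :=
  String.ofList
    (introns_list.foldl
      (fun m intron =>
        if intron.toList.length ≠ 0 ∧ PySem.Chars.isIn intron.toList m then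
          m.foldl (pvBStep intron.toList) []
        else m)
      mRNA.toList)

-- ===== PRECONDITION & SPEC =====
-- Pre_ excludes an empty-string intron: there Python A loops forever (find('') is always 0
-- and the removal deletes nothing), so A never returns.
def Pre_RemoveIntrons (mRNA : String) (introns_list : List String) : Prop :=
  ∀ s ∈ introns_list, s ≠ ""
instance (mRNA : String) (introns_list : List String) : Decidable (Pre_RemoveIntrons mRNA introns_list) := by unfold Pre_RemoveIntrons; infer_instance

def pvWitness_RemoveIntrons : String × List String := ("auguacguaau", ["ua", "cg"])

def Spec_RemoveIntrons (mRNA : String) (introns_list : List String) (out : String) : Prop := out = RemoveIntrons_alt mRNA introns_list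
instance (mRNA : String) (introns_list : List String) (out : String) : Decidable (Spec_RemoveIntrons mRNA introns_list out) := by unfold Spec_RemoveIntrons; infer_instance

-- ===== CLAIM (what is proved, stated in full; the proofs are below) =====
def Claim_equal_RemoveIntrons : Prop := ∀ (mRNA : String) (introns_list : List String), Dom_RemoveIntrons mRNA introns_list → Pre_RemoveIntrons mRNA introns_list → Spec_RemoveIntrons mRNA introns_list (RemoveIntrons mRNA introns_list)

-- ===== LEMMAS AND PROOFS =====

-- the pvBStep condition is exactly "w is a suffix of stack ++ [c]"
theorem pvBStep_eq {w : List Char} (hw : w ≠ []) (stack : List Char) (c : Char) :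
    pvBStep w stack c =
      if w <:+ (stack ++ [c]) then (stack ++ [c]).take ((stack ++ [c]).length - w.length)
      else stack ++ [c] := by
  have hk : 0 < w.length := List.length_pos_iff.mpr hw
  have hcond : w <:+ (stack ++ [c]) ↔ (stack ++ [c]).drop ((stack ++ [c]).length - w.length) = w := by
    rw [List.suffix_iff_eq_drop]; exact eq_comm
  simp only [pvBStep]
  rw [PySem.List.slice_from_neg_natCast _ _ hk, PySem.List.slice_to_neg_natCast _ _ hk]
  simp only [← hcond]

-- an occurrence of w inside stack ++ [c] is inside stack or is a suffix of stack ++ [c]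
theorem pvInfix_concat {w stack : List Char} {c : Char}
    (h : w <:+: stack ++ [c]) : w <:+: stack ∨ w <:+ (stack ++ [c]) := by
  obtain ⟨u, v, huv⟩ := h
  cases hv : v with
  | nil =>
    right
    exact ⟨u, by simpa [hv] using huv⟩
  | cons x xs =>
    left
    have hvne : v ≠ [] := by simp [hv]
    have h2 : (u ++ w) ++ v.dropLast = stack := by
      have h3 := congrArg List.dropLast huv
      rwa [List.dropLast_append_of_ne_nil hvne, List.dropLast_concat] at h3
    exact ⟨u, v.dropLast, h2⟩

-- an occurrence of w starting at j with j + |w| ≤ |stack| lies inside stack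
theorem pvPrefix_drop {w stack t : List Char} {j : Nat}
    (h : w <+: (stack ++ t).drop j) (hj : j + w.length ≤ stack.length) :
    w <:+: stack := by
  rw [List.drop_append_of_le_length (by omega)] at h
  have hlen : w.length ≤ (stack.drop j).length := by
    simp [List.length_drop]; omega
  rw [List.prefix_iff_eq_take, List.take_append_of_le_length hlen] at h
  exact ((List.prefix_iff_eq_take.mpr h).isInfix).trans (List.drop_suffix j stack).isInfix

-- in the pop case the popped suffix is the LEFTMOST occurrence of w in the whole remainder
theorem pvFind_pop {w stack : List Char} {c : Char} (rest : List Char)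
    (hno : ¬ w <:+: stack) (hsuf : w <:+ (stack ++ [c])) :
    PySem.Chars.find ((stack ++ [c]) ++ rest) w = (((stack ++ [c]).length - w.length : Nat) : Int) := by
  set st := stack ++ [c] with hst
  set s := st ++ rest with hs
  set i0 : Nat := st.length - w.length with hi0
  have hkst : w.length ≤ st.length := hsuf.length_le
  have hdropst : st.drop i0 = w := (List.suffix_iff_eq_drop.mp hsuf).symm
  have h1 : w <+: s.drop i0 := by
    rw [hs, List.drop_append_of_le_length (by omega), hdropst]
    exact List.prefix_append w rest
  have h2 : ∀ j, j < i0 → ¬ w <+: s.drop j := by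
    intro j hj hpre
    have hslen : st.length = stack.length + 1 := by simp [hst]
    have : s = stack ++ ([c] ++ rest) := by simp [hs, hst]
    rw [this] at hpre
    exact hno (pvPrefix_drop hpre (by omega))
  have hin : w <:+: s := h1.isInfix.trans (List.drop_suffix i0 s).isInfix
  have hne : PySem.Chars.find s w ≠ -1 := (PySem.Chars.find_ne_neg_one_iff s w).mpr hin
  have h0 : 0 ≤ PySem.Chars.find s w := by
    have := PySem.Chars.neg_one_le_find s w; omega
  obtain ⟨hp, hmin⟩ := PySem.Chars.find_spec h0
  have hle : (PySem.Chars.find s w).toNat ≤ i0 := by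
    by_contra hlt
    exact hmin i0 (by omega) h1
  have hge : ¬ ((PySem.Chars.find s w).toNat < i0) := fun hlt => h2 _ hlt hp
  have : (PySem.Chars.find s w).toNat = i0 := by omega
  rw [← Int.toNat_of_nonneg h0, this]

-- definitional unfolding of one iteration of A's while loop
theorem pvAStrip_succ (w : List Char) (f : Nat) (m : List Char) :
    pvAStrip w (f + 1) m =
      if PySem.Chars.find m w ≠ -1 then
        pvAStrip w f (PySem.List.slice m (some 0) (some (PySem.Chars.find m w)) ++
                      PySem.List.slice m (some (PySem.Chars.find m w + (w.length : Int))) none)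
      else m := rfl

-- one unfolding of A's while-loop body when an occurrence exists
theorem pvStep_shape (w m : List Char) (h : PySem.Chars.find m w ≠ -1) :
    ∃ i : Nat, PySem.Chars.find m w = (i : Int) ∧ i + w.length ≤ m.length ∧
      PySem.List.slice m (some 0) (some (PySem.Chars.find m w)) ++
        PySem.List.slice m (some (PySem.Chars.find m w + (w.length : Int))) none =
      m.take i ++ m.drop (i + w.length) := by
  have h0 : 0 ≤ PySem.Chars.find m w := by
    have := PySem.Chars.neg_one_le_find m w; omega
  refine ⟨(PySem.Chars.find m w).toNat, (Int.toNat_of_nonneg h0).symm, ?_, ?_⟩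
  · have hp := (PySem.Chars.find_spec h0).1
    have h1 := hp.length_le
    simp only [List.length_drop] at h1
    have h2 := PySem.Chars.find_le_length m w
    omega
  · rw [PySem.List.slice_zero_start, PySem.List.slice_to _ h0,
        PySem.List.slice_from _ (by positivity)]
    congr 1
    congr 1
    omega

-- the fuel of A's inner loop does not matter once it exceeds the string length
theorem pvAStrip_fuel {w : List Char} (hw : w ≠ []) :
    ∀ f g m, m.length < f → m.length < g → pvAStrip w f m = pvAStrip w g m := by
  intro f
  induction f using Nat.strong_induction_on with
  | _ f ih =>
    intro g m hf hg
    match f, g with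
    | f' + 1, g' + 1 =>
      rw [pvAStrip_succ, pvAStrip_succ]
      by_cases hfind : PySem.Chars.find m w ≠ -1
      · rw [if_pos hfind, if_pos hfind]
        obtain ⟨i, hi, hb, hrw⟩ := pvStep_shape w m hfind
        rw [hrw]
        have hk : 0 < w.length := List.length_pos_iff.mpr hw
        have hlen : (m.take i ++ m.drop (i + w.length)).length < m.length := by
          simp only [List.length_append, List.length_take, List.length_drop]
          omega
        exact ih f' (by omega) _ _ (by omega) (by omega)
      · rw [if_neg hfind, if_neg hfind]

theorem pvMain (w : List Char) (hw : w ≠ []) :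
    ∀ (rest stack : List Char), ¬ w <:+: stack →
      List.foldl (pvBStep w) stack rest = pvAStrip w ((stack ++ rest).length + 1) (stack ++ rest) := by
  intro rest
  induction rest with
  | nil =>
    intro stack hno
    have hfind : PySem.Chars.find stack w = -1 := (PySem.Chars.find_eq_neg_one_iff stack w).mpr hno
    simp only [List.foldl_nil, List.append_nil]
    rw [pvAStrip_succ, if_neg (by simp [hfind])]
  | cons c rest ih =>
    intro stack hno
    rw [List.foldl_cons, pvBStep_eq hw]
    have hk : 0 < w.length := List.length_pos_iff.mpr hw
    by_cases hsuf : w <:+ (stack ++ [c])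
    · -- pop case
      rw [if_pos hsuf]
      have hkst : w.length ≤ (stack ++ [c]).length := hsuf.length_le
      have hslen : (stack ++ [c]).length = stack.length + 1 := by simp
      set i0 : Nat := (stack ++ [c]).length - w.length with hi0
      set st' : List Char := (stack ++ [c]).take i0 with hst'
      have hst'stack : st' = stack.take i0 := by
        rw [hst', List.take_append_of_le_length (by omega)]
      have hno' : ¬ w <:+: st' := by
        intro hin
        exact hno (hin.trans (by rw [hst'stack]; exact (List.take_prefix i0 stack).isInfix))
      have heq : stack ++ c :: rest = (stack ++ [c]) ++ rest := by simp
      have hfind := pvFind_pop rest hno hsuf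
      have hfne : PySem.Chars.find ((stack ++ [c]) ++ rest) w ≠ -1 := by
        rw [hfind]; omega
      have htake : ((stack ++ [c]) ++ rest).take i0 = st' := by
        rw [List.take_append_of_le_length (by omega), hst']
      have hdrop : ((stack ++ [c]) ++ rest).drop (i0 + w.length) = rest := by
        have : i0 + w.length = (stack ++ [c]).length := by omega
        rw [this, List.drop_left]
      have hst'len : st'.length = i0 := by
        rw [hst']; simp; omega
      rw [heq]
      conv_rhs => rw [pvAStrip_succ, if_pos hfne]
      obtain ⟨i, hi, hb, hrw⟩ := pvStep_shape w ((stack ++ [c]) ++ rest) hfne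
      have hii0 : i = i0 := by
        rw [hi] at hfind; exact_mod_cast hfind
      rw [hrw, hii0, htake, hdrop]
      rw [ih st' hno']
      have hlen1 : (st' ++ rest).length = i0 + rest.length := by simp [hst'len]
      have hlen2 : ((stack ++ [c]) ++ rest).length = stack.length + 1 + rest.length := by simp; omega
      exact pvAStrip_fuel hw _ _ _ (by omega) (by omega)
    · -- push case
      rw [if_neg hsuf]
      have hno' : ¬ w <:+: stack ++ [c] := by
        intro hin
        rcases pvInfix_concat hin with h | h
        · exact hno h
        · exact hsuf h
      have := ih (stack ++ [c]) hno'
      simpa using this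

-- one intron: A's find/remove loop equals B's stack scan
theorem pvPerIntron (w : List Char) (hw : w ≠ []) (m : List Char) :
    pvAStrip w (m.length + 1) m = m.foldl (pvBStep w) [] := by
  have h := pvMain w hw m [] (by simp [List.infix_nil, hw])
  simpa using h.symm

-- one intron with B's skip guard: if the intron does not occur, A's loop is a no-op too
theorem pvPerIntronGuard (w : List Char) (hw : w ≠ []) (m : List Char) :
    pvAStrip w (m.length + 1) m =
      (if w.length ≠ 0 ∧ PySem.Chars.isIn w m then m.foldl (pvBStep w) [] else m) := by
  by_cases hin : PySem.Chars.isIn w m = true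
  · rw [if_pos ⟨(List.length_pos_iff.mpr hw).ne', hin⟩]
    exact pvPerIntron w hw m
  · rw [if_neg (fun h => hin h.2)]
    have hno : ¬ w <:+: m := (PySem.Chars.isIn_eq_false_iff w m).mp (by simpa using hin)
    have hfind : PySem.Chars.find m w = -1 := (PySem.Chars.find_eq_neg_one_iff m w).mpr hno
    rw [pvAStrip_succ, if_neg (by simp [hfind])]

theorem pvFolds (ws : List String) :
    ∀ m : List Char, (∀ s ∈ ws, s ≠ "") →
      ws.foldl (fun m intron => pvAStrip intron.toList (m.length + 1) m) m =
      ws.foldl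
        (fun m intron =>
          if intron.toList.length ≠ 0 ∧ PySem.Chars.isIn intron.toList m then
            m.foldl (pvBStep intron.toList) []
          else m) m := by
  induction ws with
  | nil => intro m _; rfl
  | cons a tl ih =>
    intro m h
    simp only [List.foldl_cons]
    rw [pvPerIntronGuard a.toList
      (fun hnil => h a List.mem_cons_self (String.toList_eq_nil_iff.mp hnil)) m]
    exact ih _ (fun s hs => h s (List.mem_cons_of_mem _ hs))

-- ===== VERDICT (by name: the statement is the Claim_ definition above) =====
theorem RemoveIntrons_spec : Claim_equal_RemoveIntrons := by
  intro mRNA introns_list _ hpre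
  unfold Spec_RemoveIntrons RemoveIntrons RemoveIntrons_alt
  rw [pvFolds introns_list mRNA.toList hpre]
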